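-- pv_equiv track=rewrite | github.com/coandco/advent2017 | advent2017_day16.py | manual_dance
-- ===== SOURCE A (Python) =====
-- from typing import List
--
-- def spin(line: List[str], number: int):
--     return line[-number:] + line[:-number]
--
-- def exchange(line: List[str], index_one: int, index_two: int):
--     line[index_one], line[index_two] = line[index_two], line[index_one]
--     return line
--
-- def manual_dance(line: List[str], moves: str):
--     new_line = list(line)
--     for instruction in moves.split(","):
--         if instruction.startswith("s"):
--             new_line = spin(new_line, int(instruction[1:]))
--         elif instruction.startswith("x"):
--             index_one, index_two = [int(x) for x in instruction[1:].split("/")]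
--             new_line = exchange(new_line, index_one, index_two)
--         elif instruction.startswith("p"):
--             index_one, index_two = [new_line.index(x) for x in instruction[1:].split("/")]
--             new_line = exchange(new_line, index_one, index_two)
--     return new_line
-- ===== SOURCE B (Python) =====
-- def _parse(instruction):
--     # Stage 1: turn one textual instruction into a tagged tuple.
--     if instruction.startswith("s"):
--         return ("s", int(instruction[1:]), None)
--     if instruction.startswith("x"):
--         a, b = instruction[1:].split("/")
--         return ("x", int(a), int(b))
--     if instruction.startswith("p"):
--         a, b = instruction[1:].split("/")
--         return ("p", a, b)
--     return (None, None, None)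
--
--
-- def manual_dance(line, moves):
--     n = len(line)
--     if n == 0:
--         return []
--     # Stage 1: parse the whole move string once.
--     parsed = [_parse(m) for m in moves.split(",")]
--     # Stage 2: execute; spins only adjust an offset, swaps happen in place
--     # at offset-translated positions.
--     new = list(line)
--     off = 0
--     for kind, u, v in parsed:
--         if kind == "s":
--             off = (off + max(-n, min(n, u))) % n  # slices clamp the shift to [-n, n]
--         elif kind == "x":
--             p, q = (u - off) % n, (v - off) % n
--             new[p], new[q] = new[q], new[p]
--         elif kind == "p":
--             p, q = new.index(u), new.index(v)
--             new[p], new[q] = new[q], new[p]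
--     # Stage 3: materialise the pending rotation once, by index arithmetic.
--     return [new[(n - off + i) % n] for i in range(n)]
-- ===== Notes on version B (the rewrite author's own statement) =====
-- stated objective: alternative
-- what changed: B is a staged pipeline: it first parses the whole move string into a list of tagged moves, then executes them keeping a pending rotation offset (O(1) per spin, swaps at offset-translated indices), and finally materialises the rotation once by index arithmetic instead of A's per-spin list rebuild.
import Mathlib
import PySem

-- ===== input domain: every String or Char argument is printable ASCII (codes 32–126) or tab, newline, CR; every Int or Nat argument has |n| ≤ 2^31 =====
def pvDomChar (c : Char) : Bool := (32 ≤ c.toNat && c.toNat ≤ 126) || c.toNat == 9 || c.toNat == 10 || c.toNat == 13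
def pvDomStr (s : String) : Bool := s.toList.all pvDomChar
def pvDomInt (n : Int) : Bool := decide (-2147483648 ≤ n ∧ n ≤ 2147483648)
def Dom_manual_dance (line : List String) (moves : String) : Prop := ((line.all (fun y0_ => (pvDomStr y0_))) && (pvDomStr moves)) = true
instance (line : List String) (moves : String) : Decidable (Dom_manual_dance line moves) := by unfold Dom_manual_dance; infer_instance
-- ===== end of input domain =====

-- B is a staged pipeline (parse all moves once, execute with a pending rotation offset and
-- offset-translated in-place swaps, materialise the rotation once by index arithmetic) replacing
-- A's per-spin list rebuild; only RETURN values are compared (A mutates just its local copy).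

-- ===== PORT A =====
-- exchange(line, i, j): line[i], line[j] = line[j], line[i]
def pvExchangeA (nl : List String) (i j : Int) : List String :=
  match PySem.List.pyGet? nl i, PySem.List.pyGet? nl j with
  | some a, some b => PySem.List.pySetD (PySem.List.pySetD nl i b) j a
  | _, _ => nl

-- one iteration of A's loop body
def pvStepA (nl : List String) (instr : String) : List String :=
  if PySem.Str.startswith instr "s" then
    match PySem.Int.ofStr? (PySem.Str.slice instr (some 1) none) with
    | some k => PySem.List.slice nl (some (-k)) none ++ PySem.List.slice nl none (some (-k))
    | none => nl
  else if PySem.Str.startswith instr "x" then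
    match ((PySem.Str.split? (PySem.Str.slice instr (some 1) none) "/").getD []).map PySem.Int.ofStr? with
    | [some i, some j] => pvExchangeA nl i j
    | _ => nl
  else if PySem.Str.startswith instr "p" then
    match (PySem.Str.split? (PySem.Str.slice instr (some 1) none) "/").getD [] with
    | [a, b] =>
      match PySem.List.index? nl a, PySem.List.index? nl b with
      | some i, some j => pvExchangeA nl (i : Int) (j : Int)
      | _, _ => nl
    | _ => nl
  else nl

def manual_dance (line : List String) (moves : String) : List String :=
  ((PySem.Str.split? moves ",").getD []).foldl pvStepA line

-- ===== PORT B =====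
-- B's heterogeneous tagged tuple ('s'/'x'/'p'/None, …) is ported as this inductive
inductive PvMove : Type
  | spin : Int → PvMove
  | exch : Int → Int → PvMove
  | part : String → String → PvMove
  | nop : PvMove

-- _parse(instruction): one textual instruction → tagged move
def pvParseB (instr : String) : PvMove :=
  if PySem.Str.startswith instr "s" then
    match PySem.Int.ofStr? (PySem.Str.slice instr (some 1) none) with
    | some k => .spin k
    | none => .nop
  else if PySem.Str.startswith instr "x" then
    match (PySem.Str.split? (PySem.Str.slice instr (some 1) none) "/").getD [] with
    | [sa, sb] =>
      match PySem.Int.ofStr? sa, PySem.Int.ofStr? sb with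
      | some i, some j => .exch i j
      | _, _ => .nop
    | _ => .nop
  else if PySem.Str.startswith instr "p" then
    match (PySem.Str.split? (PySem.Str.slice instr (some 1) none) "/").getD [] with
    | [a, b] => .part a b
    | _ => .nop
  else .nop

-- new[p], new[q] = new[q], new[p]  (p, q already non-negative in B)
def pvSwapB (S : List String) (p q : Nat) : List String :=
  match S[p]?, S[q]? with
  | some a, some b => (S.set p b).set q a
  | _, _ => S

-- stage 2: execute one parsed move over the state (new, off)
def pvApplyB (n : Nat) (st : List String × Int) (m : PvMove) : List String × Int :=
  match m with
  | .spin k => (st.1, PySem.Int.mod (st.2 + max (-(n : Int)) (min (n : Int) k)) n)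
  | .exch i j =>
      (pvSwapB st.1 (PySem.Int.mod (i - st.2) n).toNat (PySem.Int.mod (j - st.2) n).toNat, st.2)
  | .part a b =>
      match PySem.List.index? st.1 a, PySem.List.index? st.1 b with
      | some p, some q => (pvSwapB st.1 p q, st.2)
      | _, _ => st
  | .nop => st

def manual_dance_alt (line : List String) (moves : String) : List String :=
  if line.length = 0 then []
  else
    let parsed := ((PySem.Str.split? moves ",").getD []).map pvParseB
    let st := parsed.foldl (pvApplyB line.length) (line, 0)
    (List.range line.length).map
      (fun i => st.1.getD ((line.length - st.2.toNat + i) % line.length) "")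

-- ===== PRECONDITION & SPEC =====
-- Per-instruction admissibility (shape conditions on the input only):
-- an "s" move must carry an int; an "x" move exactly two ints in index range;
-- a "p" move exactly two names, each occurring exactly once in line.
def pvPreMove (n : Nat) (line : List String) (instr : String) : Bool :=
  if PySem.Str.startswith instr "s" then
    (PySem.Int.ofStr? (PySem.Str.slice instr (some 1) none)).isSome
  else if PySem.Str.startswith instr "x" then
    match ((PySem.Str.split? (PySem.Str.slice instr (some 1) none) "/").getD []).map PySem.Int.ofStr? with
    | [some i, some j] =>
        decide (-(n : Int) ≤ i) && decide (i < (n : Int)) && decide (-(n : Int) ≤ j) && decide (j < (n : Int))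
    | _ => false
  else if PySem.Str.startswith instr "p" then
    match (PySem.Str.split? (PySem.Str.slice instr (some 1) none) "/").getD [] with
    | [a, b] => (PySem.List.count line a == 1) && (PySem.List.count line b == 1)
    | _ => false
  else true

-- Pre_ excludes inputs where A raises (unparsable spin/exchange numbers, wrong number of
-- '/'-separated fields, exchange index out of range, partner name absent) and p-moves naming an
-- element that occurs more than once in line, where A's first-occurrence pick against its rotated
-- list is as accidental as any other choice (defensible corner).
def Pre_manual_dance (line : List String) (moves : String) : Prop :=
  ∀ instr ∈ (PySem.Str.split? moves ",").getD [], pvPreMove line.length line instr = true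
instance (line : List String) (moves : String) : Decidable (Pre_manual_dance line moves) := by
  unfold Pre_manual_dance; infer_instance

def pvWitness_manual_dance : List String × String := (["a", "b", "c"], "s1,x0/2,pa/c")

def Spec_manual_dance (line : List String) (moves : String) (out : List String) : Prop :=
  out = manual_dance_alt line moves
instance (line : List String) (moves : String) (out : List String) : Decidable (Spec_manual_dance line moves out) := by
  unfold Spec_manual_dance; infer_instance

-- ===== CLAIM (what is proved, stated in full; the proofs are below) =====
def Claim_equal_manual_dance : Prop := ∀ (line : List String) (moves : String), Dom_manual_dance line moves → Pre_manual_dance line moves → Spec_manual_dance line moves (manual_dance line moves)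

-- ===== LEMMAS AND PROOFS =====

-- the invariant tying A's list to B's (list, offset) state
def pvInv (line L S : List String) (off : Int) : Prop :=
  0 ≤ off ∧ off < line.length ∧ S.length = line.length ∧ S.Perm line ∧
    L = S.rotate ((line.length - off.toNat) % line.length)

theorem pvRotate_congr {α : Type} (S : List α) {a b : Nat} (h : a % S.length = b % S.length) :
    S.rotate a = S.rotate b := by
  rw [← List.rotate_mod, h, List.rotate_mod]

theorem pvSwap_perm {α : Type} (S : List α) (p q : Nat) (hp : p < S.length) (hq : q < S.length) :
    ((S.set p S[q]).set q S[p]).Perm S := by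
  have hq' : q < (S.set p S[q]).length := by simpa using hq
  have h1 := List.set_perm_cons_eraseIdx hp S[q]
  have h2 := List.getElem_cons_eraseIdx_perm hp
  have h3 := List.set_perm_cons_eraseIdx hq' S[p]
  have h4 := List.getElem_cons_eraseIdx_perm hq'
  have hTq : (S.set p S[q])[q] = S[q] := by
    rw [List.getElem_set]; split <;> rfl
  rw [hTq] at h4
  have h5 : ((S.set p S[q]).eraseIdx q).Perm (S.eraseIdx p) :=
    List.Perm.cons_inv (h4.trans h1)
  exact h3.trans ((h5.cons S[p]).trans h2)

theorem pvPos_unique {α : Type} [DecidableEq α] (S : List α) (a : α) (h : S.count a = 1)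
    (u v : Nat) (hu : u < S.length) (hv : v < S.length) (hau : S[u] = a) (hav : S[v] = a) :
    u = v := by
  by_contra hne
  have key : ∀ (x y : Nat), x < y → (hx : x < S.length) → (hy : y < S.length) →
      S[x] = a → S[y] = a → False := by
    intro x y hxy hx hy hx1 hy1
    have hsub : [a, a].Sublist S := by
      have t1 : [a].Sublist (S.take (x + 1)) := by
        refine List.singleton_sublist.mpr ?_
        have hxl : x < (S.take (x + 1)).length := by
          simp; omega
        have : (S.take (x + 1))[x] = a := by
          rw [List.getElem_take]; exact hx1
        exact this ▸ List.getElem_mem hxl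
      have t2 : [a].Sublist (S.drop (x + 1)) := by
        refine List.singleton_sublist.mpr ?_
        have hyl : y - (x + 1) < (S.drop (x + 1)).length := by
          simp; omega
        have : (S.drop (x + 1))[y - (x + 1)] = a := by
          rw [List.getElem_drop]
          have : x + 1 + (y - (x + 1)) = y := by omega
          simp_rw [this]; exact hy1
        exact this ▸ List.getElem_mem hyl
      have := t1.append t2
      rwa [List.take_append_drop] at this
    have := List.duplicate_iff_sublist.mpr hsub
    have h2 := List.duplicate_iff_two_le_count.mp this
    omega
  rcases Nat.lt_or_ge u v with h | h
  · exact key u v h hu hv hau hav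
  · exact key v u (by omega) hv hu hav hau

theorem pvRotate_set {α : Type} (S : List α) (r m : Nat) (v : α) (hm : m < S.length) :
    (S.rotate r).set m v = (S.set ((m + r) % S.length) v).rotate r := by
  have hn : 0 < S.length := by omega
  apply List.ext_getElem
  · simp
  intro k hk1 hk2
  have hk : k < S.length := by simpa using hk1
  have hmr : (m + r) % S.length < S.length := Nat.mod_lt _ hn
  have hkr : (k + r) % S.length < S.length := Nat.mod_lt _ hn
  rw [List.getElem_set, List.getElem_rotate, List.getElem_rotate]
  simp only [List.length_set]
  rw [List.getElem_set]
  by_cases hmk : m = k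
  · simp [hmk]
  · have hne' : ¬((m + r) % S.length = (k + r) % S.length) := by
      intro hcon
      have hmod : m % S.length = k % S.length :=
        Nat.ModEq.add_right_cancel' r hcon
      rw [Nat.mod_eq_of_lt hm, Nat.mod_eq_of_lt hk] at hmod
      exact hmk hmod
    rw [if_neg hmk, if_neg hne']

theorem pvIdx_wrap (n : Nat) (i : Int) (hn : 0 < n) (h1 : -(n : Int) ≤ i) (h2 : i < n) :
    PySem.List.pyIdx? n i = some (i.emod n).toNat := by
  simp only [PySem.List.pyIdx?]
  rw [show i.emod (n : Int) = i % (n : Int) from rfl]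
  by_cases ha : 0 ≤ i
  · rw [if_pos ha, if_pos h2, Int.emod_eq_of_lt ha h2]
  · have hmod : i % (n : Int) = i + n := by
      have h := Int.add_mul_emod_self_left i (n : Int) 1
      rw [mul_one] at h
      rw [← h, Int.emod_eq_of_lt (by omega) (by omega)]
    rw [if_neg ha, if_pos h1, hmod]
    congr 1
    omega

theorem pvGet_wrap (L : List String) (i : Int) (hn : 0 < L.length)
    (h1 : -(L.length : Int) ≤ i) (h2 : i < L.length) (hi : (i.emod L.length).toNat < L.length) :
    PySem.List.pyGet? L i = some L[(i.emod L.length).toNat] := by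
  simp only [PySem.List.pyGet?, pvIdx_wrap L.length i hn h1 h2, Option.bind_some]
  exact List.getElem?_eq_getElem hi

theorem pvSet_wrap (L : List String) (i : Int) (v : String) (hn : 0 < L.length)
    (h1 : -(L.length : Int) ≤ i) (h2 : i < L.length) :
    PySem.List.pySetD L i v = L.set (i.emod L.length).toNat v := by
  simp only [PySem.List.pySetD, PySem.List.pySet?, pvIdx_wrap L.length i hn h1 h2,
    Option.map_some, Option.getD_some]

theorem pvExchangeA_eq (L : List String) (i j : Int) (hn : 0 < L.length)
    (hi1 : -(L.length : Int) ≤ i) (hi2 : i < L.length)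
    (hj1 : -(L.length : Int) ≤ j) (hj2 : j < L.length)
    (hiN : (i.emod L.length).toNat < L.length) (hjN : (j.emod L.length).toNat < L.length) :
    pvExchangeA L i j =
      (L.set (i.emod L.length).toNat L[(j.emod L.length).toNat]).set (j.emod L.length).toNat
        L[(i.emod L.length).toNat] := by
  have e1 := pvGet_wrap L i hn hi1 hi2 hiN
  have e2 := pvGet_wrap L j hn hj1 hj2 hjN
  simp only [pvExchangeA, e1, e2]
  rw [pvSet_wrap L i _ hn hi1 hi2]
  rw [pvSet_wrap _ j _ (by simpa using hn) (by simpa using hj1) (by simpa using hj2)]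
  simp [List.length_set]

theorem pvSwapB_eq (S : List String) (p q : Nat) (hp : p < S.length) (hq : q < S.length) :
    pvSwapB S p q = (S.set p S[q]).set q S[p] := by
  simp [pvSwapB, List.getElem?_eq_getElem hp, List.getElem?_eq_getElem hq]

theorem pvNatIntZ {n : Nat} (a : Nat) (x : Int) (h : (a : Int) = x) :
    ((a : Nat) : ZMod n) = ((x : Int) : ZMod n) := by
  rw [← Int.cast_natCast, h]

theorem pvCastEmod {n : Nat} (hn : 0 < n) (x : Int) :
    (((x.emod (n : Int)).toNat : Nat) : ZMod n) = ((x : Int) : ZMod n) := by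
  have h0 : 0 ≤ x.emod (n : Int) := Int.emod_nonneg x (by omega)
  rw [pvNatIntZ _ (x.emod (n : Int)) (Int.toNat_of_nonneg h0)]
  exact ZMod.intCast_mod x n

theorem pvSpinA_eq (L : List String) (k : Int) (hn : 0 < L.length) :
    PySem.List.slice L (some (-k)) none ++ PySem.List.slice L none (some (-k)) =
      L.rotate ((-(max (-(L.length : Int)) (min (L.length : Int) k))).emod L.length).toNat := by
  rcases lt_trichotomy k 0 with hk | hk | hk
  · have h0k : (0 : Int) ≤ -k := by omega
    rw [PySem.List.slice_from L h0k, PySem.List.slice_to L h0k]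
    have hc : max (-(L.length : Int)) (min (L.length : Int) k) = max (-(L.length : Int)) k := by
      rw [min_eq_right (by omega)]
    rw [hc]
    rcases le_or_gt ((-k).toNat) L.length with hm | hm
    · rw [← List.rotate_eq_drop_append_take hm]
      apply pvRotate_congr
      have hc2 : max (-(L.length : Int)) k = k := max_eq_right (by omega)
      rw [hc2]
      apply (ZMod.natCast_eq_natCast_iff _ _ _).mp
      rw [pvCastEmod hn, pvNatIntZ _ (-k) (Int.toNat_of_nonneg h0k)]
    · rw [List.drop_eq_nil_of_le (by omega), List.take_of_length_le (by omega), List.nil_append]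
      have hc2 : max (-(L.length : Int)) k = -(L.length : Int) := max_eq_left (by omega)
      rw [hc2]
      have hz : (-(-(L.length : Int))).emod (L.length : Int) = 0 := by
        rw [neg_neg]; exact Int.emod_self
      rw [hz]
      simp
  · subst hk
    have h1 : max (-(L.length : Int)) (min (L.length : Int) 0) = 0 := by
      rw [min_eq_right (by omega), max_eq_right (by omega)]
    rw [h1]
    simp [PySem.List.slice_zero_start, PySem.List.slice_none_none,
      PySem.List.slice_to L (le_refl (0 : Int))]
    rw [show Int.emod 0 (L.length : Int) = 0 from Int.zero_emod _]
    simp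
  · have hk0 : (0 : Int) ≤ k := by omega
    have hcast : ((k.toNat : Nat) : Int) = k := Int.toNat_of_nonneg hk0
    have e1 : PySem.List.slice L (some (-k)) none = L.drop (L.length - k.toNat) := by
      rw [PySem.List.slice_some_none]
      congr 1
      rw [← hcast]
      exact PySem.List.clampIdx_neg_natCast _ _ (by omega)
    have e2 : PySem.List.slice L none (some (-k)) = L.take (L.length - k.toNat) := by
      conv_lhs => rw [← hcast]
      exact PySem.List.slice_to_neg_natCast L k.toNat (by omega)
    rw [e1, e2, ← List.rotate_eq_drop_append_take (by omega)]
    apply pvRotate_congr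
    apply (ZMod.natCast_eq_natCast_iff _ _ _).mp
    rw [pvCastEmod hn]
    rcases le_or_gt k (L.length : Int) with h2 | h2
    · have hc : max (-(L.length : Int)) (min (L.length : Int) k) = k := by
        rw [min_eq_right h2]; exact max_eq_right (by omega)
      rw [hc, pvNatIntZ _ ((L.length : Int) - k) (by omega)]
      push_cast
      rw [ZMod.natCast_self]
      ring
    · have hc : max (-(L.length : Int)) (min (L.length : Int) k) = (L.length : Int) := by
        rw [min_eq_left (by omega)]; exact max_eq_right (by omega)
      rw [hc, pvNatIntZ _ 0 (by omega)]
      push_cast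
      rw [ZMod.natCast_self]
      ring

theorem pvSwap_core (line L S : List String) (off : Int) (iN jN : Nat)
    (hn : 0 < line.length)
    (ho0 : 0 ≤ off) (hon : off < (line.length : Int)) (hSlen : S.length = line.length)
    (hperm : S.Perm line)
    (hL : L = S.rotate ((line.length - off.toNat) % line.length))
    (hi : iN < L.length) (hj : jN < L.length) :
    pvInv line ((L.set iN (L[jN]'hj)).set jN (L[iN]'hi))
      (pvSwapB S ((iN + (line.length - off.toNat) % line.length) % line.length)
        ((jN + (line.length - off.toNat) % line.length) % line.length)) off := by
  have hLlen : L.length = line.length := by rw [hL]; simp [hSlen]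
  have hpS : (iN + (line.length - off.toNat) % line.length) % line.length < S.length := by
    have := Nat.mod_lt (iN + (line.length - off.toNat) % line.length) hn
    omega
  have hqS : (jN + (line.length - off.toNat) % line.length) % line.length < S.length := by
    have := Nat.mod_lt (jN + (line.length - off.toNat) % line.length) hn
    omega
  have hiS : iN < S.length := by omega
  have hjS : jN < S.length := by omega
  have hvi : L[iN]'hi = S[(iN + (line.length - off.toNat) % line.length) % line.length]'hpS := by
    rw [List.getElem_of_eq hL, List.getElem_rotate]
    congr 1
    rw [hSlen]
  have hvj : L[jN]'hj = S[(jN + (line.length - off.toNat) % line.length) % line.length]'hqS := by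
    rw [List.getElem_of_eq hL, List.getElem_rotate]
    congr 1
    rw [hSlen]
  refine ⟨ho0, hon, ?_, ?_, ?_⟩
  · rw [pvSwapB_eq S _ _ hpS hqS]
    simpa using hSlen
  · rw [pvSwapB_eq S _ _ hpS hqS]
    exact (pvSwap_perm S _ _ hpS hqS).trans hperm
  · rw [pvSwapB_eq S _ _ hpS hqS, hvi, hvj]
    conv_lhs => rw [hL]
    rw [pvRotate_set S _ iN _ hiS]
    rw [pvRotate_set _ _ jN _ (by simpa using hjS)]
    simp only [List.length_set, hSlen]

set_option maxHeartbeats 1000000 in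
theorem pvStep_inv (line : List String) (hn : 0 < line.length) (instr : String)
    (L S : List String) (off : Int)
    (hpre : pvPreMove line.length line instr = true) (hinv : pvInv line L S off) :
    pvInv line (pvStepA L instr) (pvApplyB line.length (S, off) (pvParseB instr)).1
      (pvApplyB line.length (S, off) (pvParseB instr)).2 := by
  obtain ⟨ho0, hon, hSlen, hperm, hL⟩ := hinv
  have hLlen : L.length = line.length := by rw [hL]; simp [hSlen]
  have hn0 : (0 : Int) < (line.length : Int) := by exact_mod_cast hn
  by_cases hs : PySem.Str.startswith instr "s" = true
  · -- spin move
    rcases hk : PySem.Int.ofStr? (PySem.Str.slice instr (some 1) none) with _ | k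
    · exfalso
      simp only [pvPreMove, hs, if_true, hk] at hpre
      simp at hpre
    have hA : pvStepA L instr =
        PySem.List.slice L (some (-k)) none ++ PySem.List.slice L none (some (-k)) := by
      unfold pvStepA
      rw [if_pos hs, hk]
    have hP : pvParseB instr = .spin k := by
      unfold pvParseB
      rw [if_pos hs, hk]
    rw [hA, hP]
    show pvInv line _ S _
    have hmm : PySem.Int.mod (off + max (-(line.length : Int)) (min (line.length : Int) k))
        (line.length : Int) =
        (off + max (-(line.length : Int)) (min (line.length : Int) k)) % (line.length : Int) :=
      PySem.Int.mod_eq_emod_of_pos hn0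
    have hb1 : 0 ≤ (off + max (-(line.length : Int)) (min (line.length : Int) k)) %
        (line.length : Int) := Int.emod_nonneg _ (by omega)
    have hb2 : (off + max (-(line.length : Int)) (min (line.length : Int) k)) %
        (line.length : Int) < (line.length : Int) := Int.emod_lt_of_pos _ hn0
    show pvInv line _ S (PySem.Int.mod _ _)
    rw [hmm]
    refine ⟨hb1, hb2, hSlen, hperm, ?_⟩
    rw [pvSpinA_eq L k (by omega)]
    simp only [hLlen]
    conv_lhs => rw [hL, List.rotate_rotate]
    apply pvRotate_congr
    simp only [hSlen]
    rw [Nat.mod_mod_of_dvd _ dvd_rfl]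
    apply (ZMod.natCast_eq_natCast_iff _ _ _).mp
    rw [Nat.cast_add, ZMod.natCast_mod, pvCastEmod hn,
      pvNatIntZ (line.length - off.toNat) ((line.length : Int) - off) (by omega),
      pvNatIntZ (line.length -
          ((off + max (-(line.length : Int)) (min (line.length : Int) k)) %
            (line.length : Int)).toNat)
        ((line.length : Int) -
          (off + max (-(line.length : Int)) (min (line.length : Int) k)) % (line.length : Int))
        (by omega)]
    push_cast
    ring
  · by_cases hx : PySem.Str.startswith instr "x" = true
    · -- exchange by indices
      rcases hsp : (PySem.Str.split? (PySem.Str.slice instr (some 1) none) "/").getD []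
          with _ | ⟨sa, t1⟩
      · exfalso
        simp only [pvPreMove, hs, hx, if_true, Bool.false_eq_true, if_false, hsp,
          List.map_nil] at hpre
      rcases t1 with _ | ⟨sb, t2⟩
      · exfalso
        rcases ho : PySem.Int.ofStr? sa with _ | i <;>
          simp only [pvPreMove, hs, hx, if_true, Bool.false_eq_true, if_false, hsp,
            List.map_cons, List.map_nil, ho] at hpre
      rcases t2 with _ | ⟨sc, t3⟩
      case _ =>
        rcases hia : PySem.Int.ofStr? sa with _ | i
        · exfalso
          simp only [pvPreMove, hs, hx, if_true, Bool.false_eq_true, if_false, hsp,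
            List.map_cons, List.map_nil, hia] at hpre
        rcases hib : PySem.Int.ofStr? sb with _ | j
        · exfalso
          rcases hia2 : PySem.Int.ofStr? sa with _ | i' <;>
            simp only [pvPreMove, hs, hx, if_true, Bool.false_eq_true, if_false, hsp,
              List.map_cons, List.map_nil, hia2, hib] at hpre
        simp only [pvPreMove, hs, hx, if_true, Bool.false_eq_true, if_false, hsp,
          List.map_cons, List.map_nil, hia, hib, Bool.and_eq_true, decide_eq_true_eq] at hpre
        obtain ⟨⟨⟨hi1, hi2⟩, hj1⟩, hj2⟩ := hpre
        have hbi1 : 0 ≤ Int.emod i (line.length : Int) := Int.emod_nonneg _ (by omega)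
        have hbi2 : Int.emod i (line.length : Int) < (line.length : Int) :=
          Int.emod_lt_of_pos _ hn0
        have hbj1 : 0 ≤ Int.emod j (line.length : Int) := Int.emod_nonneg _ (by omega)
        have hbj2 : Int.emod j (line.length : Int) < (line.length : Int) :=
          Int.emod_lt_of_pos _ hn0
        have hbp1 : 0 ≤ Int.emod (i - off) (line.length : Int) := Int.emod_nonneg _ (by omega)
        have hbp2 : Int.emod (i - off) (line.length : Int) < (line.length : Int) :=
          Int.emod_lt_of_pos _ hn0
        have hbq1 : 0 ≤ Int.emod (j - off) (line.length : Int) := Int.emod_nonneg _ (by omega)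
        have hbq2 : Int.emod (j - off) (line.length : Int) < (line.length : Int) :=
          Int.emod_lt_of_pos _ hn0
        have hmi : PySem.Int.mod (i - off) (line.length : Int) =
            Int.emod (i - off) (line.length : Int) := PySem.Int.mod_eq_emod_of_pos hn0
        have hmj : PySem.Int.mod (j - off) (line.length : Int) =
            Int.emod (j - off) (line.length : Int) := PySem.Int.mod_eq_emod_of_pos hn0
        have hA : pvStepA L instr = pvExchangeA L i j := by
          unfold pvStepA
          rw [if_neg hs, if_pos hx, hsp]
          simp only [List.map_cons, List.map_nil, hia, hib]
        have hP : pvParseB instr = .exch i j := by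
          unfold pvParseB
          rw [if_neg hs, if_pos hx, hsp]
          simp only [hia, hib]
        rw [hA, hP]
        show pvInv line _ (pvSwapB S (PySem.Int.mod (i - off) (line.length : Int)).toNat
          (PySem.Int.mod (j - off) (line.length : Int)).toNat) off
        rw [hmi, hmj]
        rw [pvExchangeA_eq L i j (by omega) (by rw [hLlen]; omega) (by rw [hLlen]; omega)
          (by rw [hLlen]; omega) (by rw [hLlen]; omega) (by rw [hLlen]; omega)
          (by rw [hLlen]; omega)]
        have hplink : ((Int.emod i (line.length : Int)).toNat +
            (line.length - off.toNat) % line.length) % line.length =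
            (Int.emod (i - off) (line.length : Int)).toNat := by
          have hcast : ((((Int.emod i (line.length : Int)).toNat +
              (line.length - off.toNat) % line.length) % line.length : Nat) :
                ZMod line.length) =
              (((Int.emod (i - off) (line.length : Int)).toNat : Nat) : ZMod line.length) := by
            rw [ZMod.natCast_mod, Nat.cast_add, ZMod.natCast_mod, pvCastEmod hn, pvCastEmod hn,
              pvNatIntZ (line.length - off.toNat) ((line.length : Int) - off) (by omega)]
            push_cast
            rw [ZMod.natCast_self]
            ring
          have h2 := (ZMod.natCast_eq_natCast_iff _ _ _).mp hcast
          rw [Nat.ModEq] at h2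
          rw [Nat.mod_mod_of_dvd _ dvd_rfl] at h2
          rw [Nat.mod_eq_of_lt
            (show (Int.emod (i - off) (line.length : Int)).toNat < line.length by omega)] at h2
          exact h2
        have hqlink : ((Int.emod j (line.length : Int)).toNat +
            (line.length - off.toNat) % line.length) % line.length =
            (Int.emod (j - off) (line.length : Int)).toNat := by
          have hcast : ((((Int.emod j (line.length : Int)).toNat +
              (line.length - off.toNat) % line.length) % line.length : Nat) :
                ZMod line.length) =
              (((Int.emod (j - off) (line.length : Int)).toNat : Nat) : ZMod line.length) := by
            rw [ZMod.natCast_mod, Nat.cast_add, ZMod.natCast_mod, pvCastEmod hn, pvCastEmod hn,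
              pvNatIntZ (line.length - off.toNat) ((line.length : Int) - off) (by omega)]
            push_cast
            rw [ZMod.natCast_self]
            ring
          have h2 := (ZMod.natCast_eq_natCast_iff _ _ _).mp hcast
          rw [Nat.ModEq] at h2
          rw [Nat.mod_mod_of_dvd _ dvd_rfl] at h2
          rw [Nat.mod_eq_of_lt
            (show (Int.emod (j - off) (line.length : Int)).toNat < line.length by omega)] at h2
          exact h2
        rw [← hplink, ← hqlink]
        simp only [hLlen]
        exact pvSwap_core line L S off _ _ hn ho0 hon hSlen hperm hL
          (by rw [hLlen]; omega) (by rw [hLlen]; omega)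
      case _ =>
        exfalso
        rcases ho1 : PySem.Int.ofStr? sa with _ | i <;>
          rcases ho2 : PySem.Int.ofStr? sb with _ | j <;>
            simp only [pvPreMove, hs, hx, if_true, Bool.false_eq_true, if_false, hsp,
              List.map_cons, ho1, ho2] at hpre
    · by_cases hp : PySem.Str.startswith instr "p" = true
      · -- exchange by names
        rcases hsp : (PySem.Str.split? (PySem.Str.slice instr (some 1) none) "/").getD []
            with _ | ⟨a, t1⟩
        · exfalso
          simp only [pvPreMove, hs, hx, hp, if_true, Bool.false_eq_true, if_false, hsp] at hpre
        rcases t1 with _ | ⟨b, t2⟩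
        · exfalso
          simp only [pvPreMove, hs, hx, hp, if_true, Bool.false_eq_true, if_false, hsp] at hpre
        rcases t2 with _ | ⟨c, t3⟩
        case _ =>
          simp only [pvPreMove, hs, hx, hp, if_true, Bool.false_eq_true, if_false, hsp,
            Bool.and_eq_true, beq_iff_eq] at hpre
          obtain ⟨hca, hcb⟩ := hpre
          rw [PySem.List.count_eq] at hca hcb
          have hLperm : L.Perm line := by
            rw [hL]; exact (List.rotate_perm _ _).trans hperm
          have hcLa : List.count a L = 1 := (hLperm.count_eq a).trans hca
          have hcLb : List.count b L = 1 := (hLperm.count_eq b).trans hcb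
          have hcSa : List.count a S = 1 := (hperm.count_eq a).trans hca
          have hcSb : List.count b S = 1 := (hperm.count_eq b).trans hcb
          have haL : a ∈ L := List.count_pos_iff.mp (by omega)
          have hbL : b ∈ L := List.count_pos_iff.mp (by omega)
          have haS : a ∈ S := List.count_pos_iff.mp (by omega)
          have hbS : b ∈ S := List.count_pos_iff.mp (by omega)
          rcases hIa : PySem.List.index? L a with _ | iA
          · exact absurd haL ((PySem.List.index?_eq_none_iff _ _).mp hIa)
          rcases hIb : PySem.List.index? L b with _ | jA
          · exact absurd hbL ((PySem.List.index?_eq_none_iff _ _).mp hIb)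
          rcases hPa : PySem.List.index? S a with _ | pB
          · exact absurd haS ((PySem.List.index?_eq_none_iff _ _).mp hPa)
          rcases hPb : PySem.List.index? S b with _ | qB
          · exact absurd hbS ((PySem.List.index?_eq_none_iff _ _).mp hPb)
          obtain ⟨hiA, hLa, _⟩ := PySem.List.getElem_of_index?_eq_some hIa
          obtain ⟨hjA, hLb, _⟩ := PySem.List.getElem_of_index?_eq_some hIb
          obtain ⟨hpB, hSa, _⟩ := PySem.List.getElem_of_index?_eq_some hPa
          obtain ⟨hqB, hSb, _⟩ := PySem.List.getElem_of_index?_eq_some hPb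
          have hredA : pvStepA L instr =
              (match PySem.List.index? L a, PySem.List.index? L b with
                | some i, some j => pvExchangeA L (i : Int) (j : Int)
                | _, _ => L) := by
            unfold pvStepA
            rw [if_neg hs, if_neg hx, if_pos hp, hsp]
          have hA : pvStepA L instr = pvExchangeA L (iA : Int) (jA : Int) := by
            rw [hredA, hIa, hIb]
          have hP : pvParseB instr = .part a b := by
            unfold pvParseB
            rw [if_neg hs, if_neg hx, if_pos hp, hsp]
          have hB : pvApplyB line.length (S, off) (pvParseB instr) = (pvSwapB S pB qB, off) := by
            rw [hP]
            show (match PySem.List.index? S a, PySem.List.index? S b with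
              | some p, some q => (pvSwapB S p q, off)
              | _, _ => ((S, off) : List String × Int)) = _
            rw [hPa, hPb]
          rw [hA, hB]
          show pvInv line _ (pvSwapB S pB qB) off
          rw [pvExchangeA_eq L (iA : Int) (jA : Int) (by omega) (by omega)
            (by exact_mod_cast hiA) (by omega) (by exact_mod_cast hjA) ?hiN ?hjN]
          case hiN =>
            have h1 : Int.emod (iA : Int) ((L.length : Nat) : Int) = (iA : Int) :=
              Int.emod_eq_of_lt (by omega) (by exact_mod_cast hiA)
            rw [h1]; simpa using hiA
          case hjN =>
            have h1 : Int.emod (jA : Int) ((L.length : Nat) : Int) = (jA : Int) :=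
              Int.emod_eq_of_lt (by omega) (by exact_mod_cast hjA)
            rw [h1]; simpa using hjA
          have eiA : (Int.emod (iA : Int) ((L.length : Nat) : Int)).toNat = iA := by
            have h1 : Int.emod (iA : Int) ((L.length : Nat) : Int) = (iA : Int) :=
              Int.emod_eq_of_lt (by omega) (by exact_mod_cast hiA)
            rw [h1]; simp
          have ejA : (Int.emod (jA : Int) ((L.length : Nat) : Int)).toNat = jA := by
            have h1 : Int.emod (jA : Int) ((L.length : Nat) : Int) = (jA : Int) :=
              Int.emod_eq_of_lt (by omega) (by exact_mod_cast hjA)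
            rw [h1]; simp
          simp only [eiA, ejA]
          -- link the two searches through the rotation
          have hrl : (line.length - off.toNat) % line.length < line.length := Nat.mod_lt _ hn
          have hrota : S[(iA + (line.length - off.toNat) % line.length) % line.length]'
              (by have := Nat.mod_lt (iA + (line.length - off.toNat) % line.length) hn; omega) =
              a := by
            have hrot := List.getElem_rotate S ((line.length - off.toNat) % line.length) iA
              (by simp only [List.length_rotate]; omega)
            rw [List.getElem_of_eq hL.symm] at hrot
            simp only [hSlen] at hrot
            rw [← hrot]
            exact hLa
          have hrotb : S[(jA + (line.length - off.toNat) % line.length) % line.length]'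
              (by have := Nat.mod_lt (jA + (line.length - off.toNat) % line.length) hn; omega) =
              b := by
            have hrot := List.getElem_rotate S ((line.length - off.toNat) % line.length) jA
              (by simp only [List.length_rotate]; omega)
            rw [List.getElem_of_eq hL.symm] at hrot
            simp only [hSlen] at hrot
            rw [← hrot]
            exact hLb
          have hpeq : pB = (iA + (line.length - off.toNat) % line.length) % line.length :=
            pvPos_unique S a hcSa pB _ hpB
              (by have := Nat.mod_lt (iA + (line.length - off.toNat) % line.length) hn; omega)
              hSa hrota
          have hqeq : qB = (jA + (line.length - off.toNat) % line.length) % line.length :=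
            pvPos_unique S b hcSb qB _ hqB
              (by have := Nat.mod_lt (jA + (line.length - off.toNat) % line.length) hn; omega)
              hSb hrotb
          rw [hpeq, hqeq]
          exact pvSwap_core line L S off iA jA hn ho0 hon hSlen hperm hL hiA hjA
        case _ =>
          exfalso
          simp only [pvPreMove, hs, hx, hp, if_true, Bool.false_eq_true, if_false, hsp] at hpre
      · -- no-op instruction
        have hA : pvStepA L instr = L := by
          unfold pvStepA
          rw [if_neg hs, if_neg hx, if_neg hp]
        have hP : pvParseB instr = .nop := by
          unfold pvParseB
          rw [if_neg hs, if_neg hx, if_neg hp]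
        rw [hA, hP]
        exact ⟨ho0, hon, hSlen, hperm, hL⟩

theorem pvFold_inv (line : List String) (hn : 0 < line.length) :
    ∀ (instrs : List String) (L S : List String) (off : Int),
      (∀ instr ∈ instrs, pvPreMove line.length line instr = true) →
      pvInv line L S off →
      pvInv line (instrs.foldl pvStepA L)
        ((instrs.foldl (fun st instr => pvApplyB line.length st (pvParseB instr)) (S, off)).1)
        ((instrs.foldl (fun st instr => pvApplyB line.length st (pvParseB instr)) (S, off)).2) := by
  intro instrs
  induction instrs with
  | nil => intro L S off _ h; exact h
  | cons a l ih =>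
    intro L S off hpre hinv
    have hstep := pvStep_inv line hn a L S off (hpre a (by simp)) hinv
    have hrec := ih (pvStepA L a) (pvApplyB line.length (S, off) (pvParseB a)).1
      (pvApplyB line.length (S, off) (pvParseB a)).2 (fun i hi => hpre i (by simp [hi])) hstep
    simp only [Prod.mk.eta] at hrec
    simpa only [List.foldl_cons] using hrec

theorem pvStepA_nil (instr : String) (hpre : pvPreMove 0 [] instr = true) :
    pvStepA [] instr = [] := by
  simp only [pvStepA, pvPreMove] at hpre ⊢
  split_ifs at hpre ⊢ with h1 h2 h3
  · cases PySem.Int.ofStr? (PySem.Str.slice instr (some 1) none) <;>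
      simp [PySem.List.slice]
  · rcases hsc : ((PySem.Str.split? (PySem.Str.slice instr (some 1) none) "/").getD []).map
        PySem.Int.ofStr? with _ | ⟨o1, t1⟩
    · rw [hsc] at hpre
    rcases t1 with _ | ⟨o2, t2⟩
    · rw [hsc] at hpre; simp at hpre
    rcases t2 with _ | ⟨o3, t3⟩
    · rw [hsc] at hpre
      rcases o1 with _ | i
      · simp at hpre
      rcases o2 with _ | j
      · simp at hpre
      simp at hpre
      exfalso; omega
    rw [hsc] at hpre; simp at hpre
  · rcases hsc : (PySem.Str.split? (PySem.Str.slice instr (some 1) none) "/").getD []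
        with _ | ⟨a, t1⟩
    · rw [hsc] at hpre
    rcases t1 with _ | ⟨b, t2⟩
    · rw [hsc] at hpre
    rcases t2 with _ | ⟨c, t3⟩
    · rw [hsc] at hpre; simp [PySem.List.count_eq] at hpre
    rw [hsc] at hpre
  · rfl

theorem pvFoldA_nil (instrs : List String)
    (hpre : ∀ instr ∈ instrs, pvPreMove 0 [] instr = true) :
    instrs.foldl pvStepA [] = [] := by
  induction instrs with
  | nil => rfl
  | cons a l ih =>
    simp only [List.foldl_cons, pvStepA_nil a (hpre a (by simp))]
    exact ih (fun i hi => hpre i (by simp [hi]))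

-- B's final comprehension equals the rotation A's state carries
theorem pvReconstruct (S : List String) (off : Int) (n : Nat) (hn : 0 < n)
    (hlen : S.length = n) :
    (List.range n).map (fun i => S.getD ((n - off.toNat + i) % n) "") =
      S.rotate ((n - off.toNat) % n) := by
  apply List.ext_getElem
  · simp [hlen]
  intro k hk1 hk2
  have hk : k < n := by simpa using hk1
  have hidx : (n - off.toNat + k) % n < S.length := by
    rw [hlen]; exact Nat.mod_lt _ hn
  rw [List.getElem_map, List.getElem_range, List.getD_eq_getElem S "" hidx,
    List.getElem_rotate]
  congr 1
  rw [hlen]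
  conv_lhs => rw [Nat.add_comm, Nat.add_mod]
  conv_rhs => rw [Nat.add_mod]
  rw [Nat.mod_mod_of_dvd _ dvd_rfl]

-- ===== VERDICT (by name: the statement is the Claim_ definition above) =====
theorem manual_dance_spec : Claim_equal_manual_dance := by
  intro line moves _ hpre
  show manual_dance line moves = manual_dance_alt line moves
  by_cases hn : line.length = 0
  · have hl : line = [] := List.length_eq_zero_iff.mp hn
    subst hl
    simp only [manual_dance, manual_dance_alt, List.length_nil]
    exact pvFoldA_nil _ hpre
  · have hn' : 0 < line.length := Nat.pos_of_ne_zero hn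
    have hinv0 : pvInv line line line 0 := by
      refine ⟨le_refl 0, by exact_mod_cast hn', rfl, List.Perm.refl line, ?_⟩
      simp
    have hfin := pvFold_inv line hn' ((PySem.Str.split? moves ",").getD []) line line 0 hpre hinv0
    obtain ⟨ho0, hon, hlen, _, hL⟩ := hfin
    simp only [manual_dance, manual_dance_alt, if_neg hn, List.foldl_map]
    rw [hL]
    exact (pvReconstruct _ _ _ hn' hlen).symm
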